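-- pv_equiv track=rewrite | github.com/jamesfallon99/CA216 | substitution_cipher/substitution_cipher.py | make_number_pattern_from_word
-- ===== SOURCE A (Python) =====
-- def make_number_pattern_from_word(word): #Want to find the number pattern for every word
--     number_pattern_of_word = "" # A string that will store the number pattern.
--     num = 0 #This is the number that will be used when a new letter is found. It will increment after a new letter is found.
--     mapping_of_letters_to_nums = {} #Dictionary which will map a letter to a number.
--     word = word.upper() # As this function will be used on lower case letters later in the program, have every word in upper case will make it simpler
--     for letter in word: #For each letter in the word,
--         if letter not in mapping_of_letters_to_nums: #If not in mapping:
--             mapping_of_letters_to_nums[letter] = str(num) # Then map that letter to a number.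
--             num = num + 1 #Increment the number so when a new letter is found, it won't re-use the same number.
--         number_pattern_of_word += mapping_of_letters_to_nums[letter] #add the string of numbers associated with a word to the string called "number_pattern_of_word"
--     return number_pattern_of_word
-- ===== SOURCE B (Python) =====
-- def make_number_pattern_from_word(word):
--     # Closed-form per character: the code of c is the number of distinct
--     # letters strictly before c's first occurrence. No mapping table at all.
--     w = list(word.upper())
--     return ''.join(str(len(set(w[:w.index(c)]))) for c in w)
-- ===== Notes on version B (the rewrite author's own statement) =====
-- stated objective: alternative
-- what changed: B drops A's incremental dict-and-counter state entirely: each character's code is computed directly by the closed formula len(set(w[:w.index(c)])) (number of distinct letters strictly before the character's first occurrence), joined in one comprehension.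
import Mathlib
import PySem

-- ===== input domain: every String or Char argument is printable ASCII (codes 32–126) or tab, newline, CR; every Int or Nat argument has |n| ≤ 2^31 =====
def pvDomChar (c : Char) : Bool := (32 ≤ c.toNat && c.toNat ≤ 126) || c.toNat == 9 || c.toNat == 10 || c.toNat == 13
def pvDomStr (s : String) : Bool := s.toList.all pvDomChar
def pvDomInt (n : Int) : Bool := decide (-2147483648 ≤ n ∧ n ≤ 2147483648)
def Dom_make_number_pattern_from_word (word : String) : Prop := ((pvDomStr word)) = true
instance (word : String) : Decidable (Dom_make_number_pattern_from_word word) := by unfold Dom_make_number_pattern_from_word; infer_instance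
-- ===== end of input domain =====

-- B replaces A's incremental dict+counter loop by a per-character closed form (distinct letters before the first occurrence); objective: alternative.


-- ===== PORT A =====
-- A's loop body: if letter unseen, map it to str(num) and bump num; then append the mapped string.
def pvStepA (st : String × Int × PySem.Dict Char String) (letter : Char) : String × Int × PySem.Dict Char String :=
  let pat := st.1
  let num := st.2.1
  let d := st.2.2
  if d.contains letter then (pat ++ d.getD letter "", num, d)
  else
    let d' := d.insert letter (PySem.Int.toStr num)
    (pat ++ d'.getD letter "", num + 1, d')

def make_number_pattern_from_word (word : String) : String :=
  ((PySem.Str.upper word).toList.foldl pvStepA ("", 0, PySem.Dict.empty)).1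

-- ===== PORT B =====
-- str(len(set(w[:w.index(c)]))); w.index(c) always succeeds since c comes from w, so .getD 0 is exact
def pvCodeB (w : List Char) (c : Char) : String :=
  PySem.Int.toStr ((PySem.Set.ofList (PySem.List.slice w none (some (((PySem.List.index? w c).getD 0 : Nat) : Int)))).length : Int)

def make_number_pattern_from_word_alt (word : String) : String :=
  let w := (PySem.Str.upper word).toList
  PySem.Str.join "" (w.map (pvCodeB w))

-- ===== PRECONDITION & SPEC =====
def Spec_make_number_pattern_from_word (word : String) (out : String) : Prop := out = make_number_pattern_from_word_alt word
instance (word : String) (out : String) : Decidable (Spec_make_number_pattern_from_word word out) := by unfold Spec_make_number_pattern_from_word; infer_instance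

-- ===== CLAIM (what is proved, stated in full; the proofs are below) =====
def Claim_equal_make_number_pattern_from_word : Prop := ∀ (word : String), Dom_make_number_pattern_from_word word → Spec_make_number_pattern_from_word word (make_number_pattern_from_word word)

-- ===== LEMMAS AND PROOFS =====

theorem join_empty_nil : PySem.Str.join "" ([] : List String) = "" := by
  apply String.toList_inj.mp
  simp [PySem.Str.toList_join, PySem.Chars.join_nil]

theorem join_empty_cons (s : String) (rest : List String) :
    PySem.Str.join "" (s :: rest) = s ++ PySem.Str.join "" rest := by
  apply String.toList_inj.mp
  cases rest with
  | nil => simp [PySem.Str.toList_join, PySem.Chars.join_singleton, PySem.Chars.join_nil]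
  | cons t ts => simp [PySem.Str.toList_join, PySem.Chars.join_cons_cons]

-- B's closed form in take-form
theorem pvCodeB_eq (w : List Char) (c : Char) :
    pvCodeB w c
      = PySem.Int.toStr ((PySem.Set.ofList (w.take ((PySem.List.index? w c).getD 0))).length : Int) := by
  unfold pvCodeB
  rw [PySem.List.slice_to_natCast]

-- the code of a fresh character placed right after p is the number of distinct characters of p
theorem code_fresh (p t : List Char) (c : Char) (hc : c ∉ p) :
    pvCodeB (p ++ c :: t) c = PySem.Int.toStr ((PySem.Set.ofList p).length : Int) := by
  rw [pvCodeB_eq]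
  have h1 : PySem.List.index? (p ++ c :: t) c = some p.length := by
    have e : p ++ c :: t = (p ++ [c]) ++ t := by simp
    rw [e, PySem.List.index?_append_of_mem t (by simp)]
    exact PySem.List.index?_append_singleton_self p c hc
  rw [h1]
  simp [List.take_append_of_le_length (le_refl p.length)]

-- main invariant: the dict holds each seen letter's code, num counts the distinct letters seen
theorem loop_sync (w : List Char) : ∀ (l p : List Char) (pat : String) (dA : PySem.Dict Char String),
    w = p ++ l →
    (∀ c, dA.get? c = if c ∈ p then some (pvCodeB w c) else none) →
    (l.foldl pvStepA (pat, ((PySem.Set.ofList p).length : Int), dA)).1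
      = pat ++ PySem.Str.join "" (l.map (pvCodeB w)) := by
  intro l
  induction l with
  | nil => intro p pat dA _ _; simp [join_empty_nil]
  | cons c l ih =>
    intro p pat dA hw hd
    have hcontains : dA.contains c = decide (c ∈ p) := by
      rw [PySem.Dict.contains_eq_isSome_get?, hd c]
      by_cases h : c ∈ p <;> simp [h]
    simp only [List.foldl_cons, List.map_cons, join_empty_cons]
    by_cases hc : c ∈ p
    · -- seen letter: dict and counter unchanged
      have hg : dA.get? c = some (pvCodeB w c) := by rw [hd c]; simp [hc]
      have hA : pvStepA (pat, ((PySem.Set.ofList p).length : Int), dA) c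
          = (pat ++ pvCodeB w c, ((PySem.Set.ofList p).length : Int), dA) := by
        unfold pvStepA
        simp only [hcontains, hc, decide_true, if_true]
        rw [PySem.Dict.getD_of_get?_eq_some _ _ hg]
      have hsz : PySem.Set.ofList (p ++ [c]) = PySem.Set.ofList p := by
        rw [PySem.Set.ofList_append_singleton]
        unfold PySem.Set.add
        simp [PySem.Set.contains, PySem.Set.mem_ofList, hc]
      have hd' : ∀ x, dA.get? x = if x ∈ p ++ [c] then some (pvCodeB w x) else none := by
        intro x
        rw [hd x]
        by_cases hx : x ∈ p
        · simp [hx]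
        · rcases eq_or_ne x c with rfl | hne
          · exact absurd hc hx
          · simp [hx, hne]
      rw [hA, ← hsz, ih (p ++ [c]) _ dA (by simpa using hw) hd', String.append_assoc]
    · -- fresh letter
      have hA : pvStepA (pat, ((PySem.Set.ofList p).length : Int), dA) c
          = (pat ++ PySem.Int.toStr ((PySem.Set.ofList p).length : Int),
             ((PySem.Set.ofList p).length : Int) + 1,
             dA.insert c (PySem.Int.toStr ((PySem.Set.ofList p).length : Int))) := by
        unfold pvStepA
        simp only [hcontains, hc, decide_false, Bool.false_eq_true, if_false]
        rw [PySem.Dict.getD_of_get?_eq_some _ _ (PySem.Dict.get?_insert_self dA c _)]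
      have hval : PySem.Int.toStr ((PySem.Set.ofList p).length : Int) = pvCodeB w c := by
        rw [hw]; exact (code_fresh p l c hc).symm
      have hsz : ((PySem.Set.ofList (p ++ [c])).length : Int) = ((PySem.Set.ofList p).length : Int) + 1 := by
        rw [PySem.Set.ofList_append_singleton]
        unfold PySem.Set.add
        simp [PySem.Set.contains, PySem.Set.mem_ofList, hc]
      have hd' : ∀ x, (dA.insert c (pvCodeB w c)).get? x
          = if x ∈ p ++ [c] then some (pvCodeB w x) else none := by
        intro x
        rcases eq_or_ne x c with rfl | hne
        · rw [PySem.Dict.get?_insert_self]; simp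
        · rw [PySem.Dict.get?_insert_of_ne _ _ hne, hd x]
          by_cases hx : x ∈ p <;> simp [hx, hne]
      rw [hA, hval, ← hsz, ih (p ++ [c]) _ _ (by simpa using hw) hd', String.append_assoc]

-- ===== VERDICT (by name: the statement is the Claim_ definition above) =====
theorem make_number_pattern_from_word_spec : Claim_equal_make_number_pattern_from_word := by
  intro word _
  unfold Spec_make_number_pattern_from_word make_number_pattern_from_word make_number_pattern_from_word_alt
  have h := loop_sync (PySem.Str.upper word).toList (PySem.Str.upper word).toList [] "" PySem.Dict.empty
    (by simp) (by intro c; simp [PySem.Dict.get?_empty])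
  simpa [PySem.Set.ofList] using h
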